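-- pv_equiv track=rewrite | github.com/AvrilMZ/Teoria_de_Algoritmos | TP3/src/aprox.py | grupos_maestros_aprox
-- ===== SOURCE A (Python) =====
-- def grupos_maestros_aprox(lista_maestros, cant_grupos) -> tuple[list, int]:
--     ordenados = sorted(lista_maestros, key=lambda x: x[1], reverse=True)
--     grupos = [[] for _ in range(cant_grupos)]
--     sumas = [0 for _ in range(cant_grupos)]
--
--     for nom, fuerza in ordenados:
--         indice = min(range(cant_grupos), key=lambda i: (sumas[i] + fuerza)**2 - sumas[i]**2)
--         grupos[indice].append(nom)
--         sumas[indice] += fuerza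
--
--     return grupos, sum(s**2 for s in sumas)
-- ===== SOURCE B (Python) =====
-- def _insort(entries, item):
--     k = 0
--     n = len(entries)
--     while k < n and entries[k] < item:
--         k += 1
--     entries.insert(k, item)
--
--
-- def grupos_maestros_aprox(lista_maestros, cant_grupos) -> tuple[list, int]:
--     ordenados = sorted(lista_maestros, key=lambda x: x[1], reverse=True)
--     grupos = [[] for _ in range(cant_grupos)]
--     # (group sum, group index), kept lexicographically sorted at all times
--     entries = [(0, i) for i in range(cant_grupos)]
--
--     for nom, fuerza in ordenados:
--         if fuerza == 0:
--             # a zero force changes no sum; it goes to group 0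
--             grupos[0].append(nom)
--             continue
--         if fuerza > 0:
--             # smallest increase of the sum of squares: the lightest group
--             s, i = entries.pop(0)
--         else:
--             # largest decrease of the sum of squares: the heaviest group,
--             # lowest index first = start of the maximal-sum block
--             maxsum = entries[-1][0]
--             j = len(entries) - 1
--             while j > 0 and entries[j - 1][0] == maxsum:
--                 j -= 1
--             s, i = entries.pop(j)
--         grupos[i].append(nom)
--         _insort(entries, (s + fuerza, i))
--
--     return grupos, sum(s * s for s, _ in entries)
-- ===== Notes on version B (the rewrite author's own statement) =====
-- stated objective: faster
-- what changed: Instead of rescanning all cant_grupos groups with the quadratic key (s+f)^2 - s^2 at every step, B keeps the (group_sum, index) pairs in a lexicographically sorted list and picks the chosen group directly from its ends: the first entry for a positive force, the start of the maximal-sum block for a negative force, and group 0 for a zero force, reinserting the updated pair in order.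
import Mathlib
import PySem

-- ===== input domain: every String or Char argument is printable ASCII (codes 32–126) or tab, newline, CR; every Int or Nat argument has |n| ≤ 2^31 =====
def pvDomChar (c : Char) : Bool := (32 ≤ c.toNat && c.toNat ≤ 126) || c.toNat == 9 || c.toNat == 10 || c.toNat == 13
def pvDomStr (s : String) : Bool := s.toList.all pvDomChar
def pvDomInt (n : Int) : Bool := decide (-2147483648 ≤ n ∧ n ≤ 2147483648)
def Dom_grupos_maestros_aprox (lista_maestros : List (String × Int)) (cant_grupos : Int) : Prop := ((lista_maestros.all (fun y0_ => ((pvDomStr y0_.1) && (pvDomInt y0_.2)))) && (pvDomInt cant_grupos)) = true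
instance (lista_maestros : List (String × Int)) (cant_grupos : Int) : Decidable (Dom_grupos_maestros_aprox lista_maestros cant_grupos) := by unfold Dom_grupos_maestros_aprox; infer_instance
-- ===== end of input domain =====

-- B keeps the (group_sum, index) pairs in a lexicographically sorted list and selects the target
-- group from its ends instead of rescanning all groups with the quadratic key at every step.

-- ===== PORT A =====
def pvStepA (cant_grupos : Int) (st : List (List String) × List Int) (p : String × Int) :
    List (List String) × List Int :=
  let nom := p.1
  let fuerza := p.2
  let grupos := st.1
  let sumas := st.2
  match PySem.List.min? (PySem.List.pyRange 0 cant_grupos 1)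
      (fun i => (PySem.List.pyGetD sumas i 0 + fuerza) ^ 2 - (PySem.List.pyGetD sumas i 0) ^ 2) with
  | none => st
  | some indice =>
      (PySem.List.pySetD grupos indice (PySem.List.pyGetD grupos indice [] ++ [nom]),
       PySem.List.pySetD sumas indice (PySem.List.pyGetD sumas indice 0 + fuerza))

def grupos_maestros_aprox (lista_maestros : List (String × Int)) (cant_grupos : Int) :
    List (List String) × Int :=
  let ordenados := PySem.List.sorted lista_maestros (fun x => x.2) true
  let grupos := (PySem.List.pyRange 0 cant_grupos 1).map (fun _ => ([] : List String))
  let sumas := (PySem.List.pyRange 0 cant_grupos 1).map (fun _ => (0 : Int))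
  let st := ordenados.foldl (pvStepA cant_grupos) (grupos, sumas)
  (st.1, (st.2.map (fun s => s ^ 2)).sum)

-- ===== PORT B =====
def pvLexLt (a b : Int × Int) : Bool := a.1 < b.1 || (a.1 == b.1 && a.2 < b.2)

def pvInsort (entries : List (Int × Int)) (item : Int × Int) : List (Int × Int) :=
  match entries with
  | [] => [item]
  | e :: rest => if pvLexLt e item then e :: pvInsort rest item else item :: e :: rest

def pvFindStart (entries : List (Int × Int)) (maxsum : Int) : Nat → Nat
  | 0 => 0
  | j + 1 => if (entries.getD j (0, 0)).1 == maxsum then pvFindStart entries maxsum j else j + 1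

def pvStepB (st : List (List String) × List (Int × Int)) (p : String × Int) :
    List (List String) × List (Int × Int) :=
  let nom := p.1
  let fuerza := p.2
  let grupos := st.1
  let entries := st.2
  if fuerza == 0 then
    (PySem.List.pySetD grupos 0 (PySem.List.pyGetD grupos 0 [] ++ [nom]), entries)
  else if fuerza > 0 then
    match entries with
    | [] => st
    | (s, i) :: rest =>
        (PySem.List.pySetD grupos i (PySem.List.pyGetD grupos i [] ++ [nom]),
         pvInsort rest (s + fuerza, i))
  else
    let maxsum := (PySem.List.pyGetD entries (-1) (0, 0)).1
    let j := pvFindStart entries maxsum (entries.length - 1)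
    let si := entries.getD j (0, 0)
    (PySem.List.pySetD grupos si.2 (PySem.List.pyGetD grupos si.2 [] ++ [nom]),
     pvInsort (entries.eraseIdx j) (si.1 + fuerza, si.2))

def grupos_maestros_aprox_alt (lista_maestros : List (String × Int)) (cant_grupos : Int) :
    List (List String) × Int :=
  let ordenados := PySem.List.sorted lista_maestros (fun x => x.2) true
  let grupos := (PySem.List.pyRange 0 cant_grupos 1).map (fun _ => ([] : List String))
  let entries := (PySem.List.pyRange 0 cant_grupos 1).map (fun i => ((0 : Int), i))
  let st := ordenados.foldl pvStepB (grupos, entries)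
  (st.1, (st.2.map (fun e => e.1 * e.1)).sum)

-- ===== PRECONDITION & SPEC =====
-- Pre_ excludes exactly the inputs on which Python A raises: a nonempty master list with
-- cant_grupos ≤ 0 makes A's min() see an empty range (ValueError).
def Pre_grupos_maestros_aprox (lista_maestros : List (String × Int)) (cant_grupos : Int) : Prop :=
  lista_maestros = [] ∨ 1 ≤ cant_grupos

instance (lista_maestros : List (String × Int)) (cant_grupos : Int) : Decidable (Pre_grupos_maestros_aprox lista_maestros cant_grupos) := by unfold Pre_grupos_maestros_aprox; infer_instance

def pvWitness_grupos_maestros_aprox : (List (String × Int)) × Int := ([("ana", 3), ("bo", -2), ("cy", 3)], 2)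

def Spec_grupos_maestros_aprox (lista_maestros : List (String × Int)) (cant_grupos : Int) (out : List (List String) × Int) : Prop := out = grupos_maestros_aprox_alt lista_maestros cant_grupos
instance (lista_maestros : List (String × Int)) (cant_grupos : Int) (out : List (List String) × Int) : Decidable (Spec_grupos_maestros_aprox lista_maestros cant_grupos out) := by unfold Spec_grupos_maestros_aprox; infer_instance

-- ===== CLAIM (what is proved, stated in full; the proofs are below) =====
def Claim_equal_grupos_maestros_aprox : Prop := ∀ (lista_maestros : List (String × Int)) (cant_grupos : Int), Dom_grupos_maestros_aprox lista_maestros cant_grupos → Pre_grupos_maestros_aprox lista_maestros cant_grupos → Spec_grupos_maestros_aprox lista_maestros cant_grupos (grupos_maestros_aprox lista_maestros cant_grupos)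

-- ===== LEMMAS AND PROOFS =====

def pvLexLe (a b : Int × Int) : Prop := a.1 < b.1 ∨ (a.1 = b.1 ∧ a.2 ≤ b.2)

def pvPairs (sumas : List Int) : List (Int × Int) :=
  (List.range sumas.length).map (fun n => (sumas.getD n 0, (n : Int)))

def pvInv (sumas : List Int) (entries : List (Int × Int)) : Prop :=
  entries.Perm (pvPairs sumas) ∧ entries.Pairwise pvLexLe

theorem pv_foldl_min_stay {α κ : Type} [LinearOrder κ] (key : α → κ) (l : List α) (m : α)
    (h : ∀ y ∈ l, key m ≤ key y) :
    l.foldl (fun acc x => match acc with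
      | none => some x
      | some mm => if key x < key mm then some x else some mm) (some m) = some m := by
  induction l with
  | nil => rfl
  | cons y t ih =>
    simp only [List.foldl_cons]
    rw [if_neg (not_lt.mpr (h y (List.mem_cons_self)))]
    exact ih (fun y hy => h y (List.mem_cons_of_mem _ hy))


theorem pv_min?_first {α κ : Type} [LinearOrder κ] (l1 l2 : List α) (m : α) (key : α → κ)
    (h1 : ∀ y ∈ l1, key m < key y) (h2 : ∀ y ∈ l2, key m ≤ key y) :
    PySem.List.min? (l1 ++ m :: l2) key = some m := by
  show List.foldl _ none (l1 ++ m :: l2) = some m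
  rw [List.foldl_append]
  rcases hcase : PySem.List.min? l1 key with _ | m1
  · rw [show List.foldl _ none l1 = PySem.List.min? l1 key from rfl, hcase]
    simp only [List.foldl_cons]
    exact pv_foldl_min_stay key l2 m h2
  · rw [show List.foldl _ none l1 = PySem.List.min? l1 key from rfl, hcase]
    simp only [List.foldl_cons]
    rw [if_pos (h1 m1 (PySem.List.min?_mem hcase))]
    exact pv_foldl_min_stay key l2 m h2


theorem pvInsort_perm (l : List (Int × Int)) (x : Int × Int) : (pvInsort l x).Perm (x :: l) := by
  induction l with
  | nil => rfl
  | cons e rest ih =>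
    rw [pvInsort]
    split
    · exact ((ih.cons e).trans (List.Perm.swap x e rest)).symm.symm
    · exact List.Perm.refl _


theorem pv_mem_insort (l : List (Int × Int)) (x y : Int × Int) :
    y ∈ pvInsort l x ↔ y = x ∨ y ∈ l :=
  ⟨fun h => by simpa using (pvInsort_perm l x).mem_iff.mp h,
   fun h => (pvInsort_perm l x).mem_iff.mpr (by simpa using h)⟩


theorem pv_lexle_total (a b : Int × Int) (h : ¬ pvLexLt a b = true) : pvLexLe b a := by
  simp [pvLexLt, not_or, not_and] at h
  rcases h with ⟨h1, h2⟩
  unfold pvLexLe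
  rcases lt_trichotomy b.1 a.1 with h | h | h
  · exact Or.inl h
  · exact Or.inr ⟨h, by omega⟩
  · exact absurd h (not_lt.mpr h1)


theorem pv_lexlt_le (a b : Int × Int) (h : pvLexLt a b = true) : pvLexLe a b := by
  simp [pvLexLt] at h
  unfold pvLexLe
  rcases h with h | ⟨h1, h2⟩
  · exact Or.inl h
  · exact Or.inr ⟨h1, le_of_lt h2⟩


theorem pvInsort_pairwise (l : List (Int × Int)) (x : Int × Int) (h : l.Pairwise pvLexLe) :
    (pvInsort l x).Pairwise pvLexLe := by
  induction l with
  | nil => simp [pvInsort]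
  | cons e rest ih =>
    rw [List.pairwise_cons] at h
    rw [pvInsort]
    split
    · rename_i hlt
      rw [List.pairwise_cons]
      refine ⟨fun y hy => ?_, ih h.2⟩
      rcases (pv_mem_insort rest x y).mp hy with rfl | hy
      · exact pv_lexlt_le e y hlt
      · exact h.1 y hy
    · rename_i hnlt
      rw [List.pairwise_cons]
      refine ⟨fun y hy => ?_, List.pairwise_cons.mpr h⟩
      rcases List.mem_cons.mp hy with rfl | hy
      · exact pv_lexle_total _ _ hnlt
      · rcases pv_lexle_total e x hnlt with h1 | h1
        · rcases h.1 y hy with h2 | h2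
          · exact Or.inl (lt_trans h1 h2)
          · exact Or.inl (lt_of_lt_of_le h1 (le_of_eq h2.1))
        · rcases h.1 y hy with h2 | h2
          · exact Or.inl (lt_of_le_of_lt (le_of_eq h1.1) h2)
          · exact Or.inr ⟨h1.1.trans h2.1, le_trans h1.2 h2.2⟩


theorem pv_set_perm {α : Type} (l : List α) (n : Nat) (h : n < l.length) (v : α) :
    (l.set n v).Perm (v :: l.eraseIdx n) := by
  rw [List.set_eq_take_append_cons_drop, if_pos h, List.eraseIdx_eq_take_drop_succ]
  exact List.perm_middle


theorem pvPairs_length (sumas : List Int) : (pvPairs sumas).length = sumas.length := by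
  simp [pvPairs]


theorem pvPairs_mem (sumas : List Int) (a : Int × Int) :
    a ∈ pvPairs sumas ↔ ∃ n : Nat, n < sumas.length ∧ a = (sumas.getD n 0, (n : Int)) := by
  simp [pvPairs, List.mem_map, List.mem_range, eq_comm]


theorem pvPairs_set (sumas : List Int) (n : Nat) (h : n < sumas.length) (v : Int) :
    pvPairs (sumas.set n v) = (pvPairs sumas).set n (v, (n : Int)) := by
  unfold pvPairs
  apply List.ext_getElem
  · simp
  · intro i h1 h2
    simp only [List.length_map, List.length_range, List.length_set] at h1 h2
    simp only [List.getElem_map, List.getElem_range, List.getElem_set]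
    have h1' : i < sumas.length := by simpa using h1
    by_cases hin : n = i
    · subst hin
      simp [List.getD_eq_getElem?_getD, h]
    · have : (sumas.set n v).getD i 0 = sumas.getD i 0 := by
        simp [List.getD_eq_getElem?_getD, List.getElem?_set_ne hin]
      simp [hin]


theorem pvPairs_cons_erase (sumas : List Int) (n : Nat) (h : n < sumas.length) :
    (pvPairs sumas).Perm ((sumas.getD n 0, (n : Int)) :: (pvPairs sumas).eraseIdx n) := by
  have h' : n < (pvPairs sumas).length := by simpa [pvPairs] using h
  have := pv_set_perm (pvPairs sumas) n h' ((pvPairs sumas)[n]'h')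
  rw [List.set_getElem_self] at this
  have hget : (pvPairs sumas)[n]'h' = (sumas.getD n 0, (n : Int)) := by simp [pvPairs]
  rw [hget] at this
  exact this


theorem pv_head_lexle (a : Int × Int) (rest : List (Int × Int))
    (h : (a :: rest).Pairwise pvLexLe) : ∀ y ∈ a :: rest, pvLexLe a y := by
  intro y hy
  rcases List.mem_cons.mp hy with rfl | hy
  · exact Or.inr ⟨rfl, le_refl _⟩
  · exact (List.pairwise_cons.mp h).1 y hy


theorem pv_fst_le_getLast (l : List (Int × Int)) (h : l.Pairwise pvLexLe) (hne : l ≠ []) :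
    ∀ y ∈ l, y.1 ≤ (l.getLast hne).1 := by
  induction l with
  | nil => exact absurd rfl hne
  | cons a rest ih =>
    intro y hy
    rcases eq_or_ne rest [] with rfl | hr
    · simp at hy
      subst hy
      simp [List.getLast]
    · rw [List.getLast_cons hr]
      rcases List.mem_cons.mp hy with rfl | hy
      · have := (List.pairwise_cons.mp h).1 (rest.getLast hr) (List.getLast_mem hr)
        rcases this with h1 | h1
        · exact le_of_lt h1
        · exact le_of_eq h1.1
      · exact ih (List.pairwise_cons.mp h).2 hr y hy


theorem pvFindStart_spec (l1 l2 : List (Int × Int)) (M : Int)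
    (h1 : ∀ e ∈ l1, e.1 ≠ M) (h2 : ∀ e ∈ l2, e.1 = M) :
    ∀ p : Nat, l1.length ≤ p → p ≤ l1.length + l2.length →
      pvFindStart (l1 ++ l2) M p = l1.length := by
  intro p
  induction p with
  | zero => intro hp _; rw [pvFindStart]; omega
  | succ q ih =>
    intro hp hq
    rw [pvFindStart]
    rcases eq_or_lt_of_le hp with heq | hlt
    · have hqlen : q < l1.length := by omega
      have : ((l1 ++ l2).getD q (0, 0)) = l1[q]'hqlen := by
        rw [List.getD_eq_getElem?_getD, List.getElem?_append_left hqlen,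
          List.getElem?_eq_getElem hqlen]
        rfl
      rw [this]
      rw [if_neg (by simpa using h1 _ (List.getElem_mem hqlen))]
      omega
    · have hmem : q < (l1 ++ l2).length := by simp; omega
      have hge : l1.length ≤ q := by omega
      have : ((l1 ++ l2).getD q (0, 0)) = l2[q - l1.length]'(by simp at hmem; omega) := by
        rw [List.getD_eq_getElem?_getD, List.getElem?_append_right hge]
        simp [List.getElem?_eq_getElem (by simp at hmem; omega : q - l1.length < l2.length)]
      rw [this]
      rw [if_pos (by simpa using h2 _ (List.getElem_mem _))]
      exact ih hge (by omega)

-- A's selection: the first index minimising the key is n0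


theorem pv_argmin (k f : Int) (sumas : List Int) (n0 : Nat)
    (hn0 : (n0 : Int) < k)
    (hle : ∀ j : Int, 0 ≤ j → j < k →
      (PySem.List.pyGetD sumas (n0 : Int) 0 + f) ^ 2 - (PySem.List.pyGetD sumas (n0 : Int) 0) ^ 2 ≤
      (PySem.List.pyGetD sumas j 0 + f) ^ 2 - (PySem.List.pyGetD sumas j 0) ^ 2)
    (hlt : ∀ j : Int, 0 ≤ j → j < (n0 : Int) →
      (PySem.List.pyGetD sumas (n0 : Int) 0 + f) ^ 2 - (PySem.List.pyGetD sumas (n0 : Int) 0) ^ 2 <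
      (PySem.List.pyGetD sumas j 0 + f) ^ 2 - (PySem.List.pyGetD sumas j 0) ^ 2) :
    PySem.List.min? (PySem.List.pyRange 0 k 1)
      (fun i => (PySem.List.pyGetD sumas i 0 + f) ^ 2 - (PySem.List.pyGetD sumas i 0) ^ 2) =
      some (n0 : Int) := by
  rw [PySem.List.pyRange_one_append 0 (n0 : Int) k (by positivity) (le_of_lt hn0),
      PySem.List.pyRange_one_cons hn0]
  apply pv_min?_first
  · intro y hy
    rw [PySem.List.mem_pyRange_one] at hy
    exact hlt y hy.1 hy.2
  · intro y hy
    rw [PySem.List.mem_pyRange_one] at hy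
    exact hle y (by omega) hy.2


theorem pv_set_zero_getD (sumas : List Int) (h : sumas ≠ []) :
    sumas.set 0 (sumas.getD 0 0) = sumas := by
  cases sumas with
  | nil => exact absurd rfl h
  | cons a t => simp [List.getD]


theorem pvStep_sim (k : Int) (hk : 1 ≤ k) (g : List (List String)) (sumas : List Int)
    (entries : List (Int × Int)) (hlen : (sumas.length : Int) = k)
    (hinv : pvInv sumas entries) (nom : String) (f : Int) :
    ∃ g' s' e', pvStepA k (g, sumas) (nom, f) = (g', s') ∧
      pvStepB (g, entries) (nom, f) = (g', e') ∧ pvInv s' e' ∧ s'.length = sumas.length := by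
  obtain ⟨hperm, hsort⟩ := hinv
  have hslen : sumas.length = k.toNat := by omega
  have hsne : sumas ≠ [] := by
    intro h; rw [h] at hlen; simp at hlen; omega
  have helen : entries.length = sumas.length := by
    rw [hperm.length_eq, pvPairs_length]
  have hene : entries ≠ [] := by
    intro h; rw [h] at helen; simp at helen
    exact hsne (List.length_eq_zero_iff.mp helen.symm)
  -- membership of every (sum, index) pair in entries
  have hpair : ∀ n : Nat, n < sumas.length → (sumas.getD n 0, (n : Int)) ∈ entries := by
    intro n hn
    exact hperm.mem_iff.mpr ((pvPairs_mem sumas _).mpr ⟨n, hn, rfl⟩)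
  rcases lt_trichotomy f 0 with hf | hf | hf
  · -- f < 0
    obtain ⟨lastE, hlastE⟩ : ∃ x, entries.getLast hene = x := ⟨_, rfl⟩
    have hM' : PySem.List.pyGetD entries (-1) ((0:Int), (0:Int)) = lastE := by
      rw [PySem.List.pyGetD_neg_one _ _ hene, hlastE]
    have hub : ∀ y ∈ entries, y.1 ≤ lastE.1 := by
      have := pv_fst_le_getLast entries hsort hene
      rw [hlastE] at this
      exact this
    have hlast_mem : lastE ∈ entries := hlastE ▸ List.getLast_mem hene
    obtain ⟨l1, l2, hsplit, hl1, hl2ne, hl2sorted, hl2M⟩ :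
        ∃ l1 l2, l1 ++ l2 = entries ∧ (∀ e ∈ l1, e.1 ≠ lastE.1) ∧ l2 ≠ [] ∧
          l2.Pairwise pvLexLe ∧ (∀ e ∈ l2, e.1 = lastE.1) := by
      refine ⟨entries.takeWhile (fun e => !(e.1 == lastE.1)),
              entries.dropWhile (fun e => !(e.1 == lastE.1)),
              List.takeWhile_append_dropWhile, fun e he => by simpa using List.mem_takeWhile_imp he,
              ?_, List.Pairwise.sublist (List.dropWhile_sublist _) hsort, ?_⟩
      case _ =>
        intro h
        have hsp := List.takeWhile_append_dropWhile
          (p := fun e : Int × Int => !(e.1 == lastE.1)) (l := entries)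
        rw [h, List.append_nil] at hsp
        have hmem2 : lastE ∈ entries.takeWhile (fun e : Int × Int => !(e.1 == lastE.1)) := by
          rw [hsp]; exact hlast_mem
        exact (by simpa using List.mem_takeWhile_imp hmem2 : lastE.1 ≠ lastE.1) rfl
      case _ =>
        intro e he
        rcases hw : entries.dropWhile (fun e => !(e.1 == lastE.1)) with _ | ⟨b, l2t⟩
        · rw [hw] at he; simp at he
        · have hhead : b.1 = lastE.1 := by
            have hh := List.head?_dropWhile_not (fun e : Int × Int => !(e.1 == lastE.1)) entries
            rw [hw] at hh
            simpa using hh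
          rw [hw] at he
          have hsub : (b :: l2t).Pairwise pvLexLe :=
            hw ▸ List.Pairwise.sublist (List.dropWhile_sublist _) hsort
          have hmem : e ∈ entries := (List.dropWhile_sublist _).mem (hw ▸ he)
          rcases pv_head_lexle b l2t hsub e he with h | h
          · have h2 := hub e hmem
            rw [hhead] at h
            omega
          · rw [← h.1, hhead]
    obtain ⟨b, l2t, hbl2⟩ := List.exists_cons_of_ne_nil hl2ne
    obtain ⟨sm, im⟩ := b
    have hsmM : sm = lastE.1 := hl2M _ (hbl2 ▸ List.mem_cons_self)
    have hbmem : (sm, im) ∈ entries := by rw [← hsplit, hbl2]; exact List.mem_append_right _ List.mem_cons_self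
    obtain ⟨nm, hnm, heqb⟩ := (pvPairs_mem _ _).mp (hperm.mem_iff.mp hbmem)
    have hsm : sm = sumas.getD nm 0 := congrArg Prod.fst heqb
    have him : im = (nm : Int) := congrArg Prod.snd heqb
    have hlen12 : l1.length + l2.length = entries.length := by rw [← hsplit]; simp
    have hl2len : 1 ≤ l2.length := by rw [hbl2]; simp
    have hj : pvFindStart entries lastE.1 (entries.length - 1) = l1.length := by
      rw [← hsplit]
      exact pvFindStart_spec l1 l2 _ hl1 hl2M ((l1 ++ l2).length - 1)
        (by rw [List.length_append]; omega) (by rw [List.length_append]; omega)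
    have hgetj : entries.getD l1.length ((0:Int), (0:Int)) = (sm, im) := by
      rw [← hsplit, hbl2, List.getD_eq_getElem?_getD, List.getElem?_append_right (le_refl _)]
      simp
    have herase : entries.eraseIdx l1.length = l1 ++ l2t := by
      rw [← hsplit, hbl2, List.eraseIdx_eq_take_drop_succ]
      have ht : (l1 ++ (sm, im) :: l2t).take l1.length = l1 := List.take_left' rfl
      have hd : (l1 ++ (sm, im) :: l2t).drop (l1.length + 1) = l2t := by
        rw [show l1 ++ (sm, im) :: l2t = (l1 ++ [(sm, im)]) ++ l2t by simp]
        exact List.drop_left' (by simp)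
      rw [ht, hd]
    have hcmp : ∀ n : Nat, n < sumas.length →
        sumas.getD n 0 ≤ sm ∧ (n < nm → sumas.getD n 0 < sm) := by
      intro n hn
      have hmemn := hpair n hn
      have h2 : sumas.getD n 0 ≤ sm := by rw [hsmM]; exact hub _ hmemn
      refine ⟨h2, fun hlt => ?_⟩
      by_contra hge
      have hEq : sumas.getD n 0 = lastE.1 := by omega
      have hnotl1 : (sumas.getD n 0, (n : Int)) ∉ l1 := fun h => hl1 _ h hEq
      have hin2 : (sumas.getD n 0, (n : Int)) ∈ l2 := by
        rw [← hsplit] at hmemn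
        rcases List.mem_append.mp hmemn with h | h
        · exact absurd h hnotl1
        · exact h
      have hsub : ((sm, im) :: l2t).Pairwise pvLexLe := hbl2 ▸ hl2sorted
      rcases pv_head_lexle (sm, im) l2t hsub _ (hbl2 ▸ hin2) with h | h
      · simp only at h; omega
      · have := h.2
        simp only at this
        rw [him] at this
        exact absurd this (by omega)
    have hmin := pv_argmin k f sumas nm (by omega)
      (by
        intro j h0 hk'
        have hj' : j.toNat < sumas.length := by omega
        rw [PySem.List.pyGetD_of_nonneg sumas 0 h0, PySem.List.pyGetD_natCast]
        have h1 := (hcmp j.toNat hj').1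
        rw [hsm] at h1
        nlinarith [h1, hf])
      (by
        intro j h0 hj0
        rw [PySem.List.pyGetD_of_nonneg sumas 0 h0, PySem.List.pyGetD_natCast]
        have h1 := (hcmp j.toNat (by omega)).2 (by omega)
        rw [hsm] at h1
        nlinarith [h1, hf])
    rw [← him] at hmin
    have hA : pvStepA k (g, sumas) (nom, f) =
        (PySem.List.pySetD g im (PySem.List.pyGetD g im [] ++ [nom]), sumas.set nm (sm + f)) := by
      simp only [pvStepA]
      rw [hmin]
      dsimp only
      rw [show PySem.List.pySetD sumas im (PySem.List.pyGetD sumas im 0 + f) = sumas.set nm (sm + f) from by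
        rw [him, PySem.List.pyGetD_natCast, PySem.List.pySetD_natCast, ← hsm]]
    have hB : pvStepB (g, entries) (nom, f) =
        (PySem.List.pySetD g im (PySem.List.pyGetD g im [] ++ [nom]),
         pvInsort (l1 ++ l2t) (sm + f, im)) := by
      simp only [pvStepB]
      rw [if_neg (by simp; omega), if_neg (by omega)]
      rw [hM', hj, hgetj, herase]
    have hrest : (l1 ++ l2t).Perm ((pvPairs sumas).eraseIdx nm) := by
      have hstep : entries.Perm ((sm, im) :: (l1 ++ l2t)) := by
        rw [← hsplit, hbl2]
        exact List.perm_middle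
      have h2 := (hstep.symm.trans hperm).trans (pvPairs_cons_erase sumas nm hnm)
      rw [← hsm, ← him] at h2
      exact h2.cons_inv
    refine ⟨_, _, _, hA, hB, ⟨?_, ?_⟩, by simp⟩
    · have h3 : (pvInsort (l1 ++ l2t) (sm + f, im)).Perm ((sm + f, im) :: (pvPairs sumas).eraseIdx nm) :=
        (pvInsort_perm _ _).trans (hrest.cons _)
      have h4 : (pvPairs (sumas.set nm (sm + f))).Perm ((sm + f, (nm : Int)) :: (pvPairs sumas).eraseIdx nm) := by
        rw [pvPairs_set sumas nm hnm]
        exact pv_set_perm _ nm (by rw [pvPairs_length]; exact hnm) _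
      rw [← him] at h4
      exact h3.trans h4.symm
    · refine pvInsort_pairwise _ _ (List.Pairwise.sublist ?_ hsort)
      rw [← hsplit, hbl2]
      exact ((List.sublist_cons_self _ _).append_left l1)

  · -- f = 0
    subst hf
    have hmin := pv_argmin k 0 sumas 0 (by omega)
      (fun j _ _ => by push_cast; ring_nf; exact le_refl _)
      (fun j _ hj => by omega)
    have hA : pvStepA k (g, sumas) (nom, 0) =
        (PySem.List.pySetD g 0 (PySem.List.pyGetD g 0 [] ++ [nom]), sumas) := by
      simp only [pvStepA]
      rw [show ((0:Nat) : Int) = (0 : Int) from rfl] at hmin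
      rw [hmin]
      simp only [PySem.List.pyGetD_zero, add_zero]
      rw [show PySem.List.pySetD sumas 0 (sumas.getD 0 0) = sumas.set 0 (sumas.getD 0 0) from by
        simpa using PySem.List.pySetD_natCast sumas 0 (sumas.getD 0 0)]
      rw [pv_set_zero_getD sumas hsne]
    have hB : pvStepB (g, entries) (nom, 0) =
        (PySem.List.pySetD g 0 (PySem.List.pyGetD g 0 [] ++ [nom]), entries) := by
      simp [pvStepB]
    exact ⟨_, sumas, entries, hA, hB, ⟨hperm, hsort⟩, rfl⟩
  · -- f > 0
    obtain ⟨a, rest, rfl⟩ := List.exists_cons_of_ne_nil hene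
    obtain ⟨s0, i0⟩ := a
    have hmem0 : (s0, i0) ∈ pvPairs sumas := hperm.mem_iff.mp List.mem_cons_self
    obtain ⟨n0, hn0, heq⟩ := (pvPairs_mem _ _).mp hmem0
    have hs0 : s0 = sumas.getD n0 0 := congrArg Prod.fst heq
    have hi0 : i0 = (n0 : Int) := congrArg Prod.snd heq
    have hhead := pv_head_lexle _ _ hsort
    have hcmp : ∀ n : Nat, n < sumas.length → s0 ≤ sumas.getD n 0 ∧ (n < n0 → s0 < sumas.getD n 0) := by
      intro n hn
      rcases hhead _ (hpair n hn) with h | h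
      · exact ⟨le_of_lt h, fun _ => h⟩
      · refine ⟨le_of_eq h.1, fun hlt => ?_⟩
        rw [hi0] at h
        exact absurd h.2 (by omega)
    have hmin := pv_argmin k f sumas n0 (by omega)
      (by
        intro j h0 hk'
        have hj : j.toNat < sumas.length := by omega
        rw [PySem.List.pyGetD_of_nonneg sumas 0 h0, PySem.List.pyGetD_natCast]
        have h1 := (hcmp j.toNat hj).1
        rw [hs0] at h1
        nlinarith [h1, hf])
      (by
        intro j h0 hj0
        have hj : j.toNat < sumas.length := by omega
        rw [PySem.List.pyGetD_of_nonneg sumas 0 h0, PySem.List.pyGetD_natCast]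
        have h1 := (hcmp j.toNat (by omega)).2 (by omega)
        rw [hs0] at h1
        nlinarith [h1, hf])
    rw [← hi0] at hmin
    have hA : pvStepA k (g, sumas) (nom, f) =
        (PySem.List.pySetD g i0 (PySem.List.pyGetD g i0 [] ++ [nom]), sumas.set n0 (s0 + f)) := by
      simp only [pvStepA]
      rw [hmin]
      dsimp only
      rw [show PySem.List.pySetD sumas i0 (PySem.List.pyGetD sumas i0 0 + f) = sumas.set n0 (s0 + f) from by
        rw [hi0, PySem.List.pyGetD_natCast, PySem.List.pySetD_natCast, ← hs0]]
    have hB : pvStepB (g, (s0, i0) :: rest) (nom, f) =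
        (PySem.List.pySetD g i0 (PySem.List.pyGetD g i0 [] ++ [nom]), pvInsort rest (s0 + f, i0)) := by
      simp [pvStepB, hf]
      exact fun h => absurd h (by omega)
    have hrest : rest.Perm ((pvPairs sumas).eraseIdx n0) := by
      have h2 := hperm.trans (pvPairs_cons_erase sumas n0 hn0)
      rw [← hs0, ← hi0] at h2
      exact h2.cons_inv
    refine ⟨_, _, _, hA, hB, ⟨?_, ?_⟩, by simp⟩
    · have h3 : (pvInsort rest (s0 + f, i0)).Perm ((s0 + f, i0) :: (pvPairs sumas).eraseIdx n0) :=
        (pvInsort_perm rest (s0 + f, i0)).trans (hrest.cons _)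
      have h4 : (pvPairs (sumas.set n0 (s0 + f))).Perm ((s0 + f, (n0 : Int)) :: (pvPairs sumas).eraseIdx n0) := by
        rw [pvPairs_set sumas n0 hn0]
        exact pv_set_perm _ n0 (by rw [pvPairs_length]; exact hn0) _
      rw [← hi0] at h4
      exact h3.trans h4.symm
    · exact pvInsort_pairwise rest _ hsort.of_cons


theorem pvLoop_sim (k : Int) (hk : 1 ≤ k) (l : List (String × Int)) :
    ∀ (g : List (List String)) (sumas : List Int) (entries : List (Int × Int)),
      (sumas.length : Int) = k → pvInv sumas entries →
      (l.foldl (pvStepA k) (g, sumas)).1 = (l.foldl pvStepB (g, entries)).1 ∧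
      pvInv (l.foldl (pvStepA k) (g, sumas)).2 (l.foldl pvStepB (g, entries)).2 := by
  induction l with
  | nil => intro g sumas entries _ hinv; exact ⟨rfl, hinv⟩
  | cons p t ih =>
    intro g sumas entries hlen hinv
    obtain ⟨nom, f⟩ := p
    obtain ⟨g', s', e', hA, hB, hinv', hlen'⟩ := pvStep_sim k hk g sumas entries hlen hinv nom f
    simp only [List.foldl_cons]
    rw [hA, hB]
    exact ih g' s' e' (by rw [hlen']; exact hlen) hinv'


theorem pv_getD_map_zero {α : Type} (xs : List α) (n : Nat) :
    ((xs.map (fun _ => (0 : Int))).getD n 0) = 0 := by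
  induction xs generalizing n with
  | nil => rfl
  | cons x t ih => cases n with
    | zero => rfl
    | succ m => simp only [List.map_cons, List.getD_cons_succ]; exact ih m


theorem pv_map_getD_range {β : Type} (f : Int → β) (l : List Int) :
    (List.range l.length).map (fun n => f (l.getD n 0)) = l.map f := by
  apply List.ext_getElem
  · simp
  · intro i h1 h2
    simp only [List.getElem_map, List.getElem_range]
    rw [List.getD_eq_getElem l 0 (by simpa using h1)]


theorem pvInit (k : Int) :
    pvInv ((PySem.List.pyRange 0 k 1).map (fun _ => (0 : Int)))
          ((PySem.List.pyRange 0 k 1).map (fun i => ((0 : Int), i))) := by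
  have hlen : ((PySem.List.pyRange 0 k 1).map (fun _ => (0 : Int))).length = k.toNat := by
    simp [PySem.List.length_pyRange_one]
  have hpairs : pvPairs ((PySem.List.pyRange 0 k 1).map (fun _ => (0 : Int))) =
      (List.range k.toNat).map (fun n : Nat => ((0 : Int), (n : Int))) := by
    unfold pvPairs
    rw [hlen]
    exact List.map_congr_left (fun n _ => by rw [pv_getD_map_zero])
  have hentries : (PySem.List.pyRange 0 k 1).map (fun i => ((0 : Int), i)) =
      (List.range k.toNat).map (fun n : Nat => ((0 : Int), (n : Int))) := by
    rw [PySem.List.pyRange_one, List.map_map]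
    simp only [sub_zero]
    exact List.map_congr_left (fun n _ => by simp)
  constructor
  · rw [hpairs, hentries]
  · rw [hentries]
    refine List.Pairwise.map _ ?_ List.pairwise_lt_range
    intro a b hab
    exact Or.inr ⟨rfl, by omega⟩


theorem pv_final_sum (sa : List Int) (eb : List (Int × Int)) (hperm : eb.Perm (pvPairs sa)) :
    (sa.map (fun s => s ^ 2)).sum = (eb.map (fun e => e.1 * e.1)).sum := by
  have h1 : ((pvPairs sa).map (fun e : Int × Int => e.1 * e.1)) = sa.map (fun s => s * s) := by
    unfold pvPairs
    rw [List.map_map]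
    exact pv_map_getD_range (fun s => s * s) sa
  calc (sa.map (fun s => s ^ 2)).sum
      = (sa.map (fun s => s * s)).sum := by
        rw [List.map_congr_left (fun x _ => by ring :
          ∀ x ∈ sa, (fun s : Int => s ^ 2) x = (fun s : Int => s * s) x)]
    _ = ((pvPairs sa).map (fun e : Int × Int => e.1 * e.1)).sum := by rw [h1]
    _ = (eb.map (fun e : Int × Int => e.1 * e.1)).sum := ((hperm.map _).sum_eq).symm


theorem pv_main (lista_maestros : List (String × Int)) (cant_grupos : Int)
    (hpre : lista_maestros = [] ∨ 1 ≤ cant_grupos) :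
    grupos_maestros_aprox lista_maestros cant_grupos =
    grupos_maestros_aprox_alt lista_maestros cant_grupos := by
  rcases hpre with hnil | hk
  · subst hnil
    have hsorted : PySem.List.sorted ([] : List (String × Int)) (fun x => x.2) true = [] := rfl
    simp only [grupos_maestros_aprox, grupos_maestros_aprox_alt, hsorted, List.foldl_nil]
    refine congrArg _ ?_
    have hA0 : (((PySem.List.pyRange 0 cant_grupos 1).map (fun _ => (0 : Int))).map (fun s => s ^ 2)).sum = 0 :=
      List.sum_eq_zero (fun x hx => by
        obtain ⟨y, hy, rfl⟩ := List.mem_map.mp hx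
        obtain ⟨z, hz, rfl⟩ := List.mem_map.mp hy
        norm_num)
    have hB0 : (((PySem.List.pyRange 0 cant_grupos 1).map (fun i => ((0 : Int), i))).map (fun e => e.1 * e.1)).sum = 0 :=
      List.sum_eq_zero (fun x hx => by
        obtain ⟨y, hy, rfl⟩ := List.mem_map.mp hx
        obtain ⟨z, hz, rfl⟩ := List.mem_map.mp hy
        norm_num)
    rw [hA0, hB0]
  · simp only [grupos_maestros_aprox, grupos_maestros_aprox_alt]
    have hlen : (((PySem.List.pyRange 0 cant_grupos 1).map (fun _ => (0 : Int))).length : Int) = cant_grupos := by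
      simp [PySem.List.length_pyRange_one]
      omega
    obtain ⟨h1, h2⟩ := pvLoop_sim cant_grupos hk
      (PySem.List.sorted lista_maestros (fun x => x.2) true)
      ((PySem.List.pyRange 0 cant_grupos 1).map (fun _ => ([] : List String)))
      ((PySem.List.pyRange 0 cant_grupos 1).map (fun _ => (0 : Int)))
      ((PySem.List.pyRange 0 cant_grupos 1).map (fun i => ((0 : Int), i)))
      hlen (pvInit cant_grupos)
    exact Prod.ext h1 (pv_final_sum _ _ h2.1)


-- ===== VERDICT (by name: the statement is the Claim_ definition above) =====
theorem grupos_maestros_aprox_spec : Claim_equal_grupos_maestros_aprox := by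
  intro lista_maestros cant_grupos _ hpre
  unfold Spec_grupos_maestros_aprox
  exact pv_main lista_maestros cant_grupos hpre
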